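-- pv_equiv track=rewrite | github.com/ChenJanie/DigitalCoach | Scripts/analyseSingleExp.py | removeClipsDuplicate
-- ===== SOURCE A (Python) =====
-- import copy
--
-- def removeClipsDuplicate(_minuendClips, _subtrahendClips):
--     minuendClips=copy.deepcopy(_minuendClips)
--     subtrahendClips=copy.deepcopy(_subtrahendClips)
--
--     i=0
--     j=0
--     while(i<len(minuendClips) and j<len(subtrahendClips)):
--         mStart=minuendClips[i][0]
--         sStart=subtrahendClips[j][0]
--         mEnd=minuendClips[i][1]
--         sEnd=subtrahendClips[j][1]
--         if mStart<=sStart<mEnd or mStart<=sEnd<mEnd or sStart<=mStart<=mEnd<=sEnd: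
--             #have duplicate
--             if mStart<=sStart<=sEnd<=mEnd:
--                 minuendClips[i][1]=sStart
--                 minuendClips.insert(i+1, [sEnd, mEnd])
--                 i+=1
--                 j+=1
--             elif sStart<=mStart<=mEnd<=sEnd:
--                 minuendClips.pop(i)
--             elif mStart<=sStart<mEnd:
--                 minuendClips[i][1]=sStart
--                 i+=1
--             else:
--                 minuendClips[i][0]=sEnd
--                 j+=1
--         else:
--             if mStart<sStart:
--                 i+=1
--             else:
--                 j+=1
--
--     return minuendClips
-- ===== SOURCE B (Python) =====
-- def removeClipsDuplicate(_minuendClips, _subtrahendClips):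
--     # Stack-based rewrite: consume clips from a to-do stack, emit surviving
--     # fragments to a fresh output list; no index arithmetic, no in-place
--     # insert/pop into the middle of the minuend list.
--     todo = [list(c) for c in reversed(_minuendClips)]   # top of stack = next clip
--     subs = [list(c) for c in reversed(_subtrahendClips)]
--     out = []
--     while todo and subs:
--         c = todo.pop()
--         sc = subs[-1]
--         mS, mE = c[0], c[1]
--         sS, sE = sc[0], sc[1]
--         if mS <= sS < mE or mS <= sE < mE or sS <= mS <= mE <= sE:
--             if mS <= sS <= sE <= mE:
--                 out.append([mS, sS] + c[2:])   # left fragment survives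
--                 todo.append([sE, mE])          # right fragment still in play
--                 subs.pop()
--             elif sS <= mS <= mE <= sE:
--                 pass                            # clip fully covered: drop it
--             elif mS <= sS < mE:
--                 out.append([mS, sS] + c[2:])   # keep left part, same subtrahend
--             else:
--                 todo.append([sE] + c[1:])      # trim left edge, next subtrahend
--                 subs.pop()
--         else:
--             if mS < sS:
--                 out.append(c)                  # clip entirely before subtrahend
--             else:
--                 todo.append(c)                 # subtrahend entirely before clip
--                 subs.pop()
--     return out + list(reversed(todo))
-- ===== Notes on version B (the rewrite author's own statement) =====
-- stated objective: alternative
-- what changed: Replaces A's in-place mutation of the minuend list with index pointers i/j, middle insert and pop by a pure consume/emit sweep: two stacks (clips to do, remaining subtrahends) are consumed and surviving fragments are appended to a fresh output list, so the result list is never edited in the middle.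
-- outside the precondition, e.g. on removeClipsDuplicate([[5, 9], [7]], [[0, 1]]): A returns [[5, 9], [7]], B returns [[5, 9], [7]]
import Mathlib
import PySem

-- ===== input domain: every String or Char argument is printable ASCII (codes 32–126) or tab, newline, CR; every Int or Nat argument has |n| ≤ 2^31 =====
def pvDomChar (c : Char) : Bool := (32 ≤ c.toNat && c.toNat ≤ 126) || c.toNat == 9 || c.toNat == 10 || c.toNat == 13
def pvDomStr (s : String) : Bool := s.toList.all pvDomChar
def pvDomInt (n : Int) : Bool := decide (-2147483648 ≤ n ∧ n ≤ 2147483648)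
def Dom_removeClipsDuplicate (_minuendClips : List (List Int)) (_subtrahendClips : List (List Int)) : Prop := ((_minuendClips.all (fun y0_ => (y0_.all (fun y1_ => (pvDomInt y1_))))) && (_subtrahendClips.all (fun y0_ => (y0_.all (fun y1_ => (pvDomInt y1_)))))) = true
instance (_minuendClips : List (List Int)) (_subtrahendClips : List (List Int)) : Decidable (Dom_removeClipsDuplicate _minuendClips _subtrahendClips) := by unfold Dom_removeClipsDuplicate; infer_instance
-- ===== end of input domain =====

-- B rebuilds the result on a consume/emit stack (fresh output list; no index arithmetic,
-- no in-place insert/pop into the middle of the minuend list); objective: alternative decomposition, same cost.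


-- ===== PORT A =====
-- A's while loop over (minuendClips, i, j); the list is mutated in place (set / insert at i+1 /
-- pop at i), i and j only grow.  minuendClips[i] / subtrahendClips[j] are in range by the loop
-- condition, so List.getD is exact there; the inner clip[0]/clip[1] may raise IndexError, hence
-- PySem.List.pyGet? (the `none` arm returns m, unreachable inside Pre_).  List.set / List.insertIdx /
-- List.eraseIdx are exact for the in-range indices A uses.
def pvLoopA (s : List (List Int)) (m : List (List Int)) (i j : Nat) : List (List Int) :=
  if h : i < m.length ∧ j < s.length then
    match PySem.List.pyGet? (m.getD i []) 0, PySem.List.pyGet? (s.getD j []) 0,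
          PySem.List.pyGet? (m.getD i []) 1, PySem.List.pyGet? (s.getD j []) 1 with
    | some mS, some sS, some mE, some sE =>
      if (mS ≤ sS ∧ sS < mE) ∨ (mS ≤ sE ∧ sE < mE) ∨ (sS ≤ mS ∧ mS ≤ mE ∧ mE ≤ sE) then
        if mS ≤ sS ∧ sS ≤ sE ∧ sE ≤ mE then
          pvLoopA s (((m.set i ((m.getD i []).set 1 sS)).insertIdx (i+1) [sE, mE])) (i+1) (j+1)
        else if sS ≤ mS ∧ mS ≤ mE ∧ mE ≤ sE then
          pvLoopA s (m.eraseIdx i) i j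
        else if mS ≤ sS ∧ sS < mE then
          pvLoopA s (m.set i ((m.getD i []).set 1 sS)) (i+1) j
        else
          pvLoopA s (m.set i ((m.getD i []).set 0 sE)) i (j+1)
      else
        if mS < sS then pvLoopA s m (i+1) j else pvLoopA s m i (j+1)
    | _, _, _, _ => m
  else m
termination_by (m.length - i) + (s.length - j)
decreasing_by all_goals (obtain ⟨h1, h2⟩ := h; simp [List.length_insertIdx, List.length_eraseIdx, h1]; omega)

def removeClipsDuplicate (_minuendClips : List (List Int)) (_subtrahendClips : List (List Int)) : List (List Int) :=
  pvLoopA _subtrahendClips _minuendClips 0 0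

-- ===== PORT B =====
-- Source B's while loop over (todo, subs, out); Source B keeps todo/subs as reversed Python lists and
-- pops from the end, which is exactly a cons-list stack consumed at the head, so `todo` here is
-- the clip list in original order with the head as the stack top; out is the emitted output.
-- When subs empties, Source B returns out + reversed(todo) = out ++ todo in this representation.
-- ===== PORT B =====
-- Source B's while loop over (todo, subs, out); Source B keeps todo/subs as reversed Python lists and
-- pops/peeks at the end, which is exactly a cons-list stack consumed at the head, so `todo`/`subs`
-- here hold the clips in original order with the head as the stack top; out is the emitted output.
-- When subs empties, Source B returns out + reversed(todo), i.e. out ++ todo in this representation.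
def pvLoopB (todo subs out : List (List Int)) : List (List Int) :=
  match todo, subs with
  | [], _ => out
  | td, [] => out ++ td
  | c :: trest, sc :: srest =>
    match PySem.List.pyGet? c 0, PySem.List.pyGet? c 1, PySem.List.pyGet? sc 0, PySem.List.pyGet? sc 1 with
    | some mS, some mE, some sS, some sE =>
      if (mS ≤ sS ∧ sS < mE) ∨ (mS ≤ sE ∧ sE < mE) ∨ (sS ≤ mS ∧ mS ≤ mE ∧ mE ≤ sE) then
        if mS ≤ sS ∧ sS ≤ sE ∧ sE ≤ mE then
          pvLoopB ([sE, mE] :: trest) srest (out ++ [[mS, sS] ++ c.drop 2])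
        else if sS ≤ mS ∧ mS ≤ mE ∧ mE ≤ sE then
          pvLoopB trest (sc :: srest) out
        else if mS ≤ sS ∧ sS < mE then
          pvLoopB trest (sc :: srest) (out ++ [[mS, sS] ++ c.drop 2])
        else
          pvLoopB (([sE] ++ c.drop 1) :: trest) srest out
      else
        if mS < sS then pvLoopB trest (sc :: srest) (out ++ [c])
        else pvLoopB (c :: trest) srest out
    | _, _, _, _ => out   -- Source B raises IndexError here; unreachable inside Pre_
termination_by todo.length + subs.length
decreasing_by all_goals (first | (simp; omega) | simp)

def removeClipsDuplicate_alt (_minuendClips : List (List Int)) (_subtrahendClips : List (List Int)) : List (List Int) :=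
  pvLoopB _minuendClips _subtrahendClips []

-- ===== PRECONDITION & SPEC =====
-- Pre_ excludes inputs on which some inner clip has fewer than 2 elements while both outer lists
-- are nonempty: A indexes clip[0]/clip[1] and raises IndexError on such a clip when its sweep
-- reaches it; on the few such inputs where the sweep stops before reaching the short clip A still
-- returns (Pre_ slightly narrower than A's exact crash set; see the cite in claim.json).
def Pre_removeClipsDuplicate (_minuendClips : List (List Int)) (_subtrahendClips : List (List Int)) : Prop :=
  _minuendClips = [] ∨ _subtrahendClips = [] ∨
    ((∀ c ∈ _minuendClips, 2 ≤ c.length) ∧ (∀ c ∈ _subtrahendClips, 2 ≤ c.length))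
instance (_minuendClips : List (List Int)) (_subtrahendClips : List (List Int)) : Decidable (Pre_removeClipsDuplicate _minuendClips _subtrahendClips) := by unfold Pre_removeClipsDuplicate; infer_instance

def pvWitness_removeClipsDuplicate : List (List Int) × List (List Int) := ([[0, 10], [20, 30]], [[5, 6]])

def Spec_removeClipsDuplicate (_minuendClips : List (List Int)) (_subtrahendClips : List (List Int)) (out : List (List Int)) : Prop := out = removeClipsDuplicate_alt _minuendClips _subtrahendClips
instance (_minuendClips : List (List Int)) (_subtrahendClips : List (List Int)) (out : List (List Int)) : Decidable (Spec_removeClipsDuplicate _minuendClips _subtrahendClips out) := by unfold Spec_removeClipsDuplicate; infer_instance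

-- ===== CLAIM (what is proved, stated in full; the proofs are below) =====
def Claim_equal_removeClipsDuplicate : Prop := ∀ (_minuendClips : List (List Int)) (_subtrahendClips : List (List Int)), Dom_removeClipsDuplicate _minuendClips _subtrahendClips → Pre_removeClipsDuplicate _minuendClips _subtrahendClips → Spec_removeClipsDuplicate _minuendClips _subtrahendClips (removeClipsDuplicate _minuendClips _subtrahendClips)

-- ===== LEMMAS AND PROOFS =====

lemma pvLoopB_out (n : Nat) : ∀ todo subs out, todo.length + subs.length ≤ n →
    pvLoopB todo subs out = out ++ pvLoopB todo subs [] := by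
  induction n with
  | zero =>
    intro todo subs out h
    have ht : todo = [] := by cases todo <;> simp_all
    subst ht; rw [pvLoopB, pvLoopB]; simp
  | succ n ih =>
    intro todo subs out h
    match todo, subs with
    | [], _ => rw [pvLoopB, pvLoopB]; simp
    | (c :: t), [] => rw [pvLoopB, pvLoopB] <;> simp
    | (c :: t), (sc :: s) =>
      rw [pvLoopB, pvLoopB]
      rcases h0 : PySem.List.pyGet? c 0 with _ | mS <;>
        rcases h1 : PySem.List.pyGet? c 1 with _ | mE <;>
          rcases h2 : PySem.List.pyGet? sc 0 with _ | sS <;>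
            rcases h3 : PySem.List.pyGet? sc 1 with _ | sE <;>
              simp only []
      all_goals try simp
      split_ifs <;>
        (conv_lhs => rw [ih _ _ _ (by simp only [List.length_cons] at h ⊢; omega)]) <;>
        (conv_rhs => rw [ih _ _ _ (by simp only [List.length_cons] at h ⊢; omega)]) <;>
        simp only [List.nil_append, List.append_assoc]

lemma pv_getD_mid (pre suf : List (List Int)) (c : List Int) :
    (pre ++ c :: suf).getD pre.length [] = c := by
  induction pre with
  | nil => rfl
  | cons x xs ih => simpa using ih

lemma pv_set_mid (pre suf : List (List Int)) (c c' : List Int) :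
    (pre ++ c :: suf).set pre.length c' = pre ++ c' :: suf := by
  induction pre with
  | nil => rfl
  | cons x xs ih => simpa using ih

lemma pv_insert_mid (pre rest : List (List Int)) (x : List Int) :
    (pre ++ rest).insertIdx pre.length x = pre ++ x :: rest := by
  induction pre with
  | nil => rfl
  | cons y ys ih => simpa [List.insertIdx] using ih

lemma pv_erase_mid (pre suf : List (List Int)) (c : List Int) :
    (pre ++ c :: suf).eraseIdx pre.length = pre ++ suf := by
  induction pre with
  | nil => rfl
  | cons x xs ih => simpa using ih

lemma pv_get0 (a b : Int) (t : List Int) : PySem.List.pyGet? (a :: b :: t) 0 = some a := by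
  simpa using PySem.List.pyGet?_ofNat (xs := a :: b :: t) (n := 0) (by simp)

lemma pv_get1 (a b : Int) (t : List Int) : PySem.List.pyGet? (a :: b :: t) 1 = some b := by
  simpa using PySem.List.pyGet?_ofNat (xs := a :: b :: t) (n := 1) (by simp)

lemma pvLoopA_eq (s : List (List Int)) (n : Nat) :
    ∀ (pre suf : List (List Int)) (j : Nat),
      suf.length + (s.length - j) ≤ n →
      (∀ c ∈ suf, 2 ≤ c.length) → (∀ c ∈ s.drop j, 2 ≤ c.length) →
      pvLoopA s (pre ++ suf) pre.length j = pre ++ pvLoopB suf (s.drop j) [] := by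
  induction n with
  | zero =>
    intro pre suf j hn hm hs
    have hsuf : suf = [] := by cases suf <;> simp_all
    have hj : s.length ≤ j := by simp [hsuf] at hn; omega
    subst hsuf
    rw [pvLoopA, dif_neg (by simp)]
    rw [List.drop_eq_nil_iff.mpr hj]
    rw [pvLoopB]
    try simp
  | succ n ih =>
    intro pre suf j hn hm hs
    cases suf with
    | nil =>
      rw [pvLoopA, dif_neg (by simp)]
      rw [pvLoopB]
      try simp
    | cons c suf' =>
      rcases hdrop : s.drop j with _ | ⟨sc, srest⟩
      · have hj : s.length ≤ j := List.drop_eq_nil_iff.mp hdrop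
        rw [pvLoopA, dif_neg (by simp; omega)]
        rw [pvLoopB] <;> try simp
      · have hj : j < s.length := by
          by_contra hcon
          rw [List.drop_eq_nil_iff.mpr (by omega)] at hdrop; exact absurd hdrop (by simp)
        have hsc2 : 2 ≤ sc.length := hs sc (by rw [hdrop]; simp)
        have hc2 : 2 ≤ c.length := hm c (by simp)
        obtain ⟨a, b, t, rfl⟩ : ∃ a b t, c = a :: b :: t := by
          match c, hc2 with | a :: b :: t, _ => exact ⟨a, b, t, rfl⟩
        obtain ⟨p, q, u, rfl⟩ : ∃ p q u, sc = p :: q :: u := by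
          match sc, hsc2 with | p :: q :: u, _ => exact ⟨p, q, u, rfl⟩
        have hjget : s[j]? = some (p :: q :: u) := by
          have h0 : (s.drop j)[0]? = s[j + 0]? := List.getElem?_drop
          rw [hdrop] at h0; simpa using h0.symm
        have hgs : s.getD j [] = p :: q :: u := by
          simp [List.getD_eq_getElem?_getD, hjget]
        have hdrop1 : s.drop (j + 1) = srest := by
          have h1 : s.drop (j + 1) = (s.drop j).drop 1 := (List.drop_drop).symm
          rw [h1, hdrop]; rfl
        rw [pvLoopA, dif_pos ⟨by simp, hj⟩]
        rw [pvLoopB]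
        simp only [pv_getD_mid, hgs, pv_get0, pv_get1]
        have hmem1 : ∀ x ∈ suf', 2 ≤ x.length := fun x hx => hm x (by simp [hx])
        have hsrest : ∀ x ∈ srest, 2 ≤ x.length := fun x hx => hs x (by rw [hdrop]; exact List.mem_cons_of_mem _ hx)
        have hs1 : ∀ x ∈ s.drop (j + 1), 2 ≤ x.length := by rw [hdrop1]; exact hsrest
        have hnn : suf'.length + (s.length - j) ≤ n := by simp at hn; omega
        have hnn1 : (suf'.length + 1) + (s.length - (j + 1)) ≤ n := by simp at hn; omega
        have hm2 : ∀ x ∈ ([q, b] : List Int) :: suf', 2 ≤ x.length := by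
          intro x hx
          rcases List.mem_cons.mp hx with rfl | hx
          · simp
          · exact hmem1 x hx
        have hm3 : ∀ x ∈ (List.set (a :: b :: t) 0 q) :: suf', 2 ≤ x.length := by
          intro x hx
          rcases List.mem_cons.mp hx with rfl | hx
          · simp
          · exact hmem1 x hx
        split_ifs with hO hA hB hC hD
        · -- subtrahend strictly inside: split the clip
          have e1 : ((pre ++ (a :: b :: t) :: suf').set pre.length ((a :: b :: t).set 1 p)).insertIdx
              (pre.length + 1) [q, b] = (pre ++ [a :: p :: t]) ++ ([q, b] :: suf') := by
            rw [pv_set_mid]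
            rw [show pre ++ (List.set (a :: b :: t) 1 p) :: suf' = (pre ++ [a :: p :: t]) ++ suf' by simp]
            rw [show pre.length + 1 = (pre ++ [a :: p :: t]).length by simp]
            rw [pv_insert_mid]
          rw [e1, show pre.length + 1 = (pre ++ [a :: p :: t]).length by simp]
          rw [ih (pre ++ [a :: p :: t]) ([q, b] :: suf') (j + 1) (by simp; omega) hm2 hs1]
          rw [hdrop1, pvLoopB_out (([q, b] :: suf').length + srest.length) ([q, b] :: suf') srest
              ([] ++ [[a, p] ++ List.drop 2 (a :: b :: t)]) (le_refl _)]
          simp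
        · -- clip fully covered: drop it
          rw [pv_erase_mid]
          rw [ih pre suf' j hnn hmem1 hs]
          rw [hdrop]
        · -- keep the left part, same subtrahend
          rw [pv_set_mid]
          rw [show pre ++ (List.set (a :: b :: t) 1 p) :: suf' = (pre ++ [a :: p :: t]) ++ suf' by simp]
          rw [show pre.length + 1 = (pre ++ [a :: p :: t]).length by simp]
          rw [ih (pre ++ [a :: p :: t]) suf' j (by omega) hmem1 hs]
          rw [hdrop, pvLoopB_out (suf'.length + ((p :: q :: u) :: srest).length) suf' ((p :: q :: u) :: srest)
              ([] ++ [[a, p] ++ List.drop 2 (a :: b :: t)]) (le_refl _)]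
          simp
        · -- trim the left edge, advance the subtrahend
          rw [pv_set_mid]
          rw [ih pre ((List.set (a :: b :: t) 0 q) :: suf') (j + 1) (by simp; omega) hm3 hs1]
          rw [hdrop1]
          rfl
        · -- no overlap, clip first: emit it
          rw [show pre ++ (a :: b :: t) :: suf' = (pre ++ [a :: b :: t]) ++ suf' by simp]
          rw [show pre.length + 1 = (pre ++ [a :: b :: t]).length by simp]
          rw [ih (pre ++ [a :: b :: t]) suf' j (by omega) hmem1 hs]
          rw [hdrop, pvLoopB_out (suf'.length + ((p :: q :: u) :: srest).length) suf' ((p :: q :: u) :: srest)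
              ([] ++ [a :: b :: t]) (le_refl _)]
          try simp
          try rfl
        · -- no overlap, subtrahend first: advance it
          rw [ih pre ((a :: b :: t) :: suf') (j + 1) (by simp; omega) hm hs1]
          rw [hdrop1]

-- ===== VERDICT (by name: the statement is the Claim_ definition above) =====
theorem removeClipsDuplicate_spec : Claim_equal_removeClipsDuplicate := by
  intro m s _ hpre
  unfold Spec_removeClipsDuplicate removeClipsDuplicate removeClipsDuplicate_alt
  rcases hpre with h | h | ⟨h1, h2⟩
  · subst h
    rw [pvLoopA, dif_neg (by simp)]
    rw [pvLoopB]
  · subst h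
    rw [pvLoopA, dif_neg (by simp)]
    cases m with
    | nil => rw [pvLoopB]
    | cons c t => rw [pvLoopB] <;> try simp
  · have h := pvLoopA_eq s (m.length + s.length) [] m 0 (by omega) h1 (by simpa using h2)
    simpa using h
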